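-- pv_equiv track=rewrite | github.com/BarryYin/bookagent2025 | podcast_audio_generator.py | _parse_podcast_script
-- ===== SOURCE A (Python) =====
-- from typing import Dict, List, Optional, Any
--
-- def _parse_podcast_script(script: str) -> List[Dict[str, Any]]:
--     """解析播客脚本"""
--     segments = []
--     current_segment = {"type": "intro", "content": ""}
--
--     lines = script.split('\n')
--     for line in lines:
--         line = line.strip()
--
--         # 检查是否是片段标题
--         if line.startswith('### '):
--             if current_segment["content"].strip():
--                 segments.append(current_segment)
--
--             segment_type = line.replace('### ', '').lower()
--             current_segment = {
--                 "type": segment_type,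
--                 "content": ""
--             }
--         elif line and not line.startswith('#') and not line.startswith('```'):
--             # 添加内容
--             if current_segment["content"]:
--                 current_segment["content"] += " "
--             current_segment["content"] += line
--
--     # 添加最后一个片段
--     if current_segment["content"].strip():
--         segments.append(current_segment)
--
--     return segments
-- ===== SOURCE B (Python) =====
-- from typing import Dict, List, Any
--
-- def _parse_podcast_script(script: str) -> List[Dict[str, Any]]:
--     """Two-phase parse: collect (type, lines) sections first, then render/filter."""
--     sections = []
--     cur_type, cur_lines = "intro", []
--     for raw in script.split('\n'):
--         line = raw.strip()
--         if line.startswith('### '):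
--             sections.append((cur_type, cur_lines))
--             cur_type, cur_lines = line.replace('### ', '').lower(), []
--         elif line and not line.startswith('#') and not line.startswith('```'):
--             cur_lines.append(line)
--     sections.append((cur_type, cur_lines))
--     return [{"type": t, "content": " ".join(ls)} for t, ls in sections if ls]
-- ===== Notes on version B (the rewrite author's own statement) =====
-- stated objective: alternative
-- what changed: Replaces A's emit-during-scan shape (a mutable current_segment whose content string is grown and flushed into the output at each header) by a two-phase shape: first collect all (type, line-list) sections, then render every section by joining its lines with single spaces and filter out the empty ones.
import Mathlib
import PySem

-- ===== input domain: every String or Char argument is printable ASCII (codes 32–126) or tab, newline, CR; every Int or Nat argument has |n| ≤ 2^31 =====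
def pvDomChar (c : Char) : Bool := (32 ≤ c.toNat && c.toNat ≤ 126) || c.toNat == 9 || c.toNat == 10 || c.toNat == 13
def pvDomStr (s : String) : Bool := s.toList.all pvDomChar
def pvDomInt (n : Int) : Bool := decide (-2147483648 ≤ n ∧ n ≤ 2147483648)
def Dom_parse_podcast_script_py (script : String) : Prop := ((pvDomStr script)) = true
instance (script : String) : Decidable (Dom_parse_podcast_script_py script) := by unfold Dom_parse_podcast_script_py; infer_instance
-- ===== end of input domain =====

-- B replaces A's emit-during-scan string accumulator by a two-phase shape (collect
-- (type, lines) sections, then join/filter-render); same O(n) cost, different decomposition.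


-- ===== PORT A =====
-- one loop iteration of A: state = (segments, (current type, current content))
def pvAStep (st : List (List (String × String)) × String × String) (raw : String) :
    List (List (String × String)) × String × String :=
  let line := PySem.Str.strip raw
  if PySem.Str.startswith line "### " then
    let segs := if PySem.Str.strip st.2.2 ≠ "" then
        st.1 ++ [[("type", st.2.1), ("content", st.2.2)]] else st.1
    (segs, PySem.Str.lower (PySem.Str.replace line "### " ""), "")
  else if line ≠ "" ∧ PySem.Str.startswith line "#" = false ∧
      PySem.Str.startswith line "```" = false then
    (st.1, st.2.1, (if st.2.2 ≠ "" then st.2.2 ++ " " else st.2.2) ++ line)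
  else st

def parse_podcast_script_py (script : String) : List (List (String × String)) :=
  let lines := (PySem.Str.split? script "\n").getD []
  let fin := lines.foldl pvAStep ([], "intro", "")
  if PySem.Str.strip fin.2.2 ≠ "" then fin.1 ++ [[("type", fin.2.1), ("content", fin.2.2)]]
  else fin.1

-- ===== PORT B =====
-- one loop iteration of B: state = (sections, (current type, current line list))
def pvBStep (st : List (String × List String) × String × List String) (raw : String) :
    List (String × List String) × String × List String :=
  let line := PySem.Str.strip raw
  if PySem.Str.startswith line "### " then
    (st.1 ++ [(st.2.1, st.2.2)], PySem.Str.lower (PySem.Str.replace line "### " ""), [])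
  else if line ≠ "" ∧ PySem.Str.startswith line "#" = false ∧
      PySem.Str.startswith line "```" = false then
    (st.1, st.2.1, st.2.2 ++ [line])
  else st

-- second phase of B: keep sections with lines, render each as a dict
def pvRender (secs : List (String × List String)) : List (List (String × String)) :=
  (secs.filter (fun r => !r.2.isEmpty)).map
    (fun r => [("type", r.1), ("content", PySem.Str.join " " r.2)])

def parse_podcast_script_py_alt (script : String) : List (List (String × String)) :=
  let lines := (PySem.Str.split? script "\n").getD []
  let fin := lines.foldl pvBStep ([], "intro", [])
  pvRender (fin.1 ++ [(fin.2.1, fin.2.2)])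

-- ===== PRECONDITION & SPEC =====
def Spec_parse_podcast_script_py (script : String) (out : List (List (String × String))) : Prop := out = parse_podcast_script_py_alt script
instance (script : String) (out : List (List (String × String))) : Decidable (Spec_parse_podcast_script_py script out) := by unfold Spec_parse_podcast_script_py; infer_instance

-- ===== CLAIM (what is proved, stated in full; the proofs are below) =====
def Claim_equal_parse_podcast_script_py : Prop := ∀ (script : String), Dom_parse_podcast_script_py script → Spec_parse_podcast_script_py script (parse_podcast_script_py script)

-- ===== LEMMAS AND PROOFS =====

-- the state invariant relating A's accumulator to B's section list
def pvInv (a : List (List (String × String)) × String × String)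
    (b : List (String × List String) × String × List String) : Prop :=
  a.1 = pvRender b.1 ∧ a.2.1 = b.2.1 ∧
  a.2.2.toList = List.intercalate [' '] (b.2.2.map String.toList) ∧
  PySem.Chars.lstrip a.2.2.toList = a.2.2.toList ∧
  PySem.Chars.rstrip a.2.2.toList = a.2.2.toList ∧
  (a.2.2 = "" ↔ b.2.2 = [])

theorem pv_dropWhile_head {p : Char → Bool} {h : Char} {t : List Char}
    (H : List.dropWhile p (h :: t) = h :: t) : p h = false := by
  by_cases hp : p h = true
  · exfalso
    have := List.length_dropWhile_le p t
    simp [hp] at H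
    have := congrArg List.length H
    simp at this; omega
  · simpa using hp

theorem pv_rstrip_strip (x : List Char) :
    PySem.Chars.rstrip (PySem.Chars.strip x) = PySem.Chars.strip x := by
  simp [PySem.Chars.strip, PySem.Chars.rstrip, PySem.Chars.lstrip,
    List.dropWhile_idempotent]

theorem pv_lstrip_strip (x : List Char) :
    PySem.Chars.lstrip (PySem.Chars.strip x) = PySem.Chars.strip x := by
  set y := PySem.Chars.lstrip x with hy
  have hyy : List.dropWhile PySem.Chars.isspace y = y := by
    simp [hy, PySem.Chars.lstrip, List.dropWhile_idempotent]
  have hpre : PySem.Chars.strip x <+: y := by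
    have : (List.dropWhile PySem.Chars.isspace y.reverse).reverse <+: y.reverse.reverse :=
      (List.dropWhile_suffix _).reverse
    rw [List.reverse_reverse] at this
    simpa [PySem.Chars.strip, PySem.Chars.rstrip, ← hy] using this
  cases hs : PySem.Chars.strip x with
  | nil => simp [PySem.Chars.lstrip]
  | cons h t =>
    rw [hs] at hpre
    obtain ⟨u, hu⟩ := hpre
    have hph : PySem.Chars.isspace h = false := by
      apply pv_dropWhile_head (t := t ++ u)
      have := hyy
      rw [← hu] at this
      simpa using this
    simp [PySem.Chars.lstrip, hph]

-- intercalate over an appended singleton, nonempty case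
theorem pv_intercalate_append_singleton (sep y x : List Char) (xs : List (List Char)) :
    List.intercalate sep ((x :: xs) ++ [y]) = List.intercalate sep (x :: xs) ++ sep ++ y := by
  induction xs generalizing x <;> simp_all [List.intercalate]

theorem pvRender_append (xs ys : List (String × List String)) :
    pvRender (xs ++ ys) = pvRender xs ++ pvRender ys := by
  simp [pvRender, List.filter_append]

theorem pv_lstrip_append {c d : List Char} (h : PySem.Chars.lstrip c = c) (hc : c ≠ []) :
    PySem.Chars.lstrip (c ++ d) = c ++ d := by
  have h' : List.dropWhile PySem.Chars.isspace c = c := h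
  show List.dropWhile PySem.Chars.isspace (c ++ d) = c ++ d
  rw [List.dropWhile_append, h']
  simp [hc]

theorem pv_rstrip_append {c d : List Char} (h : PySem.Chars.rstrip d = d) (hd : d ≠ []) :
    PySem.Chars.rstrip (c ++ d) = c ++ d := by
  have h' : List.dropWhile PySem.Chars.isspace d.reverse = d.reverse := by
    have := congrArg List.reverse h
    simpa [PySem.Chars.rstrip] using this
  show ((List.dropWhile PySem.Chars.isspace (c ++ d).reverse).reverse : List Char) = c ++ d
  rw [List.reverse_append, List.dropWhile_append, h']
  simp [hd]

theorem pv_strip_self {c : String}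
    (h1 : PySem.Chars.lstrip c.toList = c.toList)
    (h2 : PySem.Chars.rstrip c.toList = c.toList) : PySem.Str.strip c = c := by
  apply String.toList_inj.mp
  simp [PySem.Str.toList_strip, PySem.Chars.strip, h1, h2]

theorem pv_content_eq {c : String} {ls : List String}
    (h : c.toList = List.intercalate [' '] (ls.map String.toList)) :
    PySem.Str.join " " ls = c := by
  apply String.toList_inj.mp
  simp [PySem.Str.toList_join, PySem.Chars.join, h]

theorem pvAStep_eq_header (st : List (List (String × String)) × String × String)
    (raw : String) (hh : PySem.Str.startswith (PySem.Str.strip raw) "### " = true) :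
    pvAStep st raw = ((if PySem.Str.strip st.2.2 ≠ "" then
        st.1 ++ [[("type", st.2.1), ("content", st.2.2)]] else st.1),
      PySem.Str.lower (PySem.Str.replace (PySem.Str.strip raw) "### " ""), "") := by
  simp only [pvAStep]
  rw [if_pos hh]

theorem pvAStep_eq_content (st : List (List (String × String)) × String × String)
    (raw : String) (hh : PySem.Str.startswith (PySem.Str.strip raw) "### " = false)
    (hg : PySem.Str.strip raw ≠ "" ∧ PySem.Str.startswith (PySem.Str.strip raw) "#" = false ∧
      PySem.Str.startswith (PySem.Str.strip raw) "```" = false) :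
    pvAStep st raw = (st.1, st.2.1,
      (if st.2.2 ≠ "" then st.2.2 ++ " " else st.2.2) ++ PySem.Str.strip raw) := by
  simp only [pvAStep]
  rw [if_neg (by rw [hh]; simp), if_pos hg]

theorem pvAStep_eq_skip (st : List (List (String × String)) × String × String)
    (raw : String) (hh : PySem.Str.startswith (PySem.Str.strip raw) "### " = false)
    (hg : ¬(PySem.Str.strip raw ≠ "" ∧ PySem.Str.startswith (PySem.Str.strip raw) "#" = false ∧
      PySem.Str.startswith (PySem.Str.strip raw) "```" = false)) :
    pvAStep st raw = st := by
  simp only [pvAStep]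
  rw [if_neg (by rw [hh]; simp), if_neg hg]

theorem pvBStep_eq_header (st : List (String × List String) × String × List String)
    (raw : String) (hh : PySem.Str.startswith (PySem.Str.strip raw) "### " = true) :
    pvBStep st raw = (st.1 ++ [(st.2.1, st.2.2)],
      PySem.Str.lower (PySem.Str.replace (PySem.Str.strip raw) "### " ""), []) := by
  simp only [pvBStep]
  rw [if_pos hh]

theorem pvBStep_eq_content (st : List (String × List String) × String × List String)
    (raw : String) (hh : PySem.Str.startswith (PySem.Str.strip raw) "### " = false)
    (hg : PySem.Str.strip raw ≠ "" ∧ PySem.Str.startswith (PySem.Str.strip raw) "#" = false ∧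
      PySem.Str.startswith (PySem.Str.strip raw) "```" = false) :
    pvBStep st raw = (st.1, st.2.1, st.2.2 ++ [PySem.Str.strip raw]) := by
  simp only [pvBStep]
  rw [if_neg (by rw [hh]; simp), if_pos hg]

theorem pvBStep_eq_skip (st : List (String × List String) × String × List String)
    (raw : String) (hh : PySem.Str.startswith (PySem.Str.strip raw) "### " = false)
    (hg : ¬(PySem.Str.strip raw ≠ "" ∧ PySem.Str.startswith (PySem.Str.strip raw) "#" = false ∧
      PySem.Str.startswith (PySem.Str.strip raw) "```" = false)) :
    pvBStep st raw = st := by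
  simp only [pvBStep]
  rw [if_neg (by rw [hh]; simp), if_neg hg]

theorem pv_step_inv {a : List (List (String × String)) × String × String}
    {b : List (String × List String) × String × List String} (raw : String)
    (h : pvInv a b) : pvInv (pvAStep a raw) (pvBStep b raw) := by
  obtain ⟨hseg, htyp, hcont, hl, hr, hemp⟩ := h
  have hflush : PySem.Str.strip a.2.2 = a.2.2 := pv_strip_self hl hr
  cases hh : PySem.Str.startswith (PySem.Str.strip raw) "### " with
  | true =>
    rw [pvAStep_eq_header a raw hh, pvBStep_eq_header b raw hh]
    have hrender : (if PySem.Str.strip a.2.2 ≠ "" then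
        a.1 ++ [[("type", a.2.1), ("content", a.2.2)]] else a.1) =
        pvRender (b.1 ++ [(b.2.1, b.2.2)]) := by
      rw [pvRender_append, hflush]
      by_cases he : a.2.2 = ""
      · have : b.2.2 = [] := hemp.mp he
        simp [he, this, pvRender, hseg]
      · have hls : b.2.2 ≠ [] := fun hn => he (hemp.mpr hn)
        have : PySem.Str.join " " b.2.2 = a.2.2 := pv_content_eq hcont
        simp [pvRender, he, hls, hseg, htyp, this]
    exact ⟨hrender, rfl, by simp [List.intercalate], by simp [PySem.Chars.lstrip],
      by simp [PySem.Chars.rstrip], by simp⟩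
  | false =>
    by_cases hg : PySem.Str.strip raw ≠ "" ∧ PySem.Str.startswith (PySem.Str.strip raw) "#" = false ∧
        PySem.Str.startswith (PySem.Str.strip raw) "```" = false
    · rw [pvAStep_eq_content a raw hh hg, pvBStep_eq_content b raw hh hg]
      have hlineL : PySem.Chars.lstrip (PySem.Chars.strip raw.toList) = PySem.Chars.strip raw.toList :=
        pv_lstrip_strip _
      have hlineR : PySem.Chars.rstrip (PySem.Chars.strip raw.toList) = PySem.Chars.strip raw.toList :=
        pv_rstrip_strip _
      have hlineNe : PySem.Chars.strip raw.toList ≠ [] := by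
        intro hn
        exact hg.1 (String.toList_inj.mp (by simp [hn]))
      by_cases he : a.2.2 = ""
      · have hls : b.2.2 = [] := hemp.mp he
        refine ⟨hseg, htyp, ?_, ?_, ?_, ?_⟩
        · simp [he, hls, List.intercalate]
        · simp [he, hlineL]
        · simp [he, hlineR]
        · simp only [he, hls]
          constructor
          · intro hn
            have := congrArg String.toList hn
            simp at this
            exact absurd this hlineNe
          · intro hn; simp at hn
      · have hls : b.2.2 ≠ [] := fun hn => he (hemp.mpr hn)
        have hcNe : a.2.2.toList ≠ [] := fun hn => he (String.toList_inj.mp (by simp [hn]))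
        obtain ⟨x, xs, hx⟩ : ∃ x xs, b.2.2.map String.toList = x :: xs := by
          cases hbb : b.2.2 with
          | nil => exact absurd hbb hls
          | cons y ys => exact ⟨y.toList, ys.map String.toList, by simp⟩
        have harr : (if a.2.2 ≠ "" then a.2.2 ++ " " else a.2.2) ++ PySem.Str.strip raw
            = a.2.2 ++ " " ++ PySem.Str.strip raw := by simp [he]
        refine ⟨hseg, htyp, ?_, ?_, ?_, ?_⟩
        · rw [harr]
          have hto : (a.2.2 ++ " " ++ PySem.Str.strip raw).toList =
              a.2.2.toList ++ [' '] ++ (PySem.Str.strip raw).toList := by simp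
          rw [hto, List.map_append, List.map_cons, List.map_nil, hx,
            pv_intercalate_append_singleton, ← hx, ← hcont]
        · rw [harr]
          have := pv_lstrip_append (d := (" " ++ PySem.Str.strip raw).toList) hl hcNe
          simpa using this
        · rw [harr]
          have := pv_rstrip_append (c := (a.2.2 ++ " ").toList) hlineR hlineNe
          simpa using this
        · constructor
          · intro hn
            rw [harr] at hn
            have := congrArg String.toList hn
            simp at this
          · intro hn; simp at hn
    · rw [pvAStep_eq_skip a raw hh hg, pvBStep_eq_skip b raw hh hg]
      exact ⟨hseg, htyp, hcont, hl, hr, hemp⟩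

theorem pv_fold_inv (lines : List String)
    {a : List (List (String × String)) × String × String}
    {b : List (String × List String) × String × List String} (h : pvInv a b) :
    pvInv (lines.foldl pvAStep a) (lines.foldl pvBStep b) := by
  induction lines generalizing a b with
  | nil => exact h
  | cons l ls ih =>
    rw [List.foldl_cons, List.foldl_cons]
    exact ih (pv_step_inv l h)

theorem pv_final {a : List (List (String × String)) × String × String}
    {b : List (String × List String) × String × List String} (h : pvInv a b) :
    (if PySem.Str.strip a.2.2 ≠ "" then a.1 ++ [[("type", a.2.1), ("content", a.2.2)]] else a.1)
      = pvRender (b.1 ++ [(b.2.1, b.2.2)]) := by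
  obtain ⟨hseg, htyp, hcont, hl, hr, hemp⟩ := h
  rw [pvRender_append, pv_strip_self hl hr]
  by_cases he : a.2.2 = ""
  · have : b.2.2 = [] := hemp.mp he
    simp [he, this, pvRender, hseg]
  · have hls : b.2.2 ≠ [] := fun hn => he (hemp.mpr hn)
    have : PySem.Str.join " " b.2.2 = a.2.2 := pv_content_eq hcont
    simp [pvRender, he, hls, hseg, htyp, this]

-- ===== VERDICT (by name: the statement is the Claim_ definition above) =====
theorem parse_podcast_script_py_spec : Claim_equal_parse_podcast_script_py := by
  intro script _
  unfold Spec_parse_podcast_script_py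
  have h0 : pvInv ([], "intro", "") ([], "intro", []) := by
    refine ⟨by simp [pvRender], rfl, by simp [List.intercalate], by simp [PySem.Chars.lstrip],
      by simp [PySem.Chars.rstrip], by simp⟩
  show (if PySem.Str.strip (((PySem.Str.split? script "\n").getD []).foldl pvAStep ([], "intro", "")).2.2 ≠ "" then
      (((PySem.Str.split? script "\n").getD []).foldl pvAStep ([], "intro", "")).1 ++
        [[("type", (((PySem.Str.split? script "\n").getD []).foldl pvAStep ([], "intro", "")).2.1),
          ("content", (((PySem.Str.split? script "\n").getD []).foldl pvAStep ([], "intro", "")).2.2)]]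
    else (((PySem.Str.split? script "\n").getD []).foldl pvAStep ([], "intro", "")).1)
    = pvRender ((((PySem.Str.split? script "\n").getD []).foldl pvBStep ([], "intro", [])).1 ++
        [((((PySem.Str.split? script "\n").getD []).foldl pvBStep ([], "intro", [])).2.1,
          (((PySem.Str.split? script "\n").getD []).foldl pvBStep ([], "intro", [])).2.2)])
  exact pv_final (pv_fold_inv ((PySem.Str.split? script "\n").getD []) h0)
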